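-- pv_equiv track=rewrite | github.com/zadorian/SEARCH_ENGINEER | BACKEND/modules/syntax/operators.py | get_entity_types
-- ===== SOURCE A (Python) =====
-- from typing import Dict, List, Optional, Set
--
-- ENTITY_OPERATOR_TO_TYPE: Dict[str, str] = {
--     # Full forms (lowercase)
--     "@person?": "person",
--     "@company?": "company",
--     "@email?": "email",
--     "@phone?": "phone",
--     "@address?": "address",
--     "@username?": "username",
--     # Short forms (lowercase)
--     "@p?": "person",
--     "@c?": "company",
--     "@e?": "email",
--     "@t?": "phone",
--     "@a?": "address",
--     "@u?": "username",
-- }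
--
-- ENTITY_ALL_OPERATORS: Set[str] = {"@entity?", "@ent?"}
--
-- ENTITY_ALL_TYPES: Set[str] = {"person", "company", "email", "phone", "address", "username"}
--
-- def get_entity_types(operators: List[str]) -> Set[str]:
--     """Get entity types requested by a list of operators."""
--     # Check for "extract all" operators
--     if any(op in ENTITY_ALL_OPERATORS for op in operators):
--         return ENTITY_ALL_TYPES.copy()
--
--     result = set()
--     for op in operators:
--         if op in ENTITY_OPERATOR_TO_TYPE:
--             result.add(ENTITY_OPERATOR_TO_TYPE[op])
--     return result
-- ===== SOURCE B (Python) =====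
-- from typing import Dict, List, Set
--
-- SHORT_TO_TYPE: Dict[str, str] = {
--     "p": "person", "c": "company", "e": "email",
--     "t": "phone", "a": "address", "u": "username",
-- }
-- ALL_TYPES_ORDERED: List[str] = ["person", "company", "email", "phone", "address", "username"]
--
-- def get_entity_types(operators: List[str]) -> Set[str]:
--     """Parse '@<core>?' operators directly instead of a 14-entry lookup table."""
--     result = set()
--     for op in operators:
--         if op.startswith("@") and op.endswith("?"):
--             core = op[1:-1]
--             if core in ("entity", "ent"):
--                 return set(ALL_TYPES_ORDERED)
--             full = SHORT_TO_TYPE.get(core, core)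
--             if full in ALL_TYPES_ORDERED:
--                 result.add(full)
--     return result
-- ===== Notes on version B (the rewrite author's own statement) =====
-- stated objective: alternative
-- what changed: B replaces A's two scans over a 14-entry operator table (an any() pre-scan plus a dict-lookup loop) with a single pass that parses each operator's '@<core>?' shape directly, early-returns all types on core 'entity'/'ent', expands a 6-entry short-letter map and otherwise accepts the core itself as a type name.
import Mathlib
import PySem

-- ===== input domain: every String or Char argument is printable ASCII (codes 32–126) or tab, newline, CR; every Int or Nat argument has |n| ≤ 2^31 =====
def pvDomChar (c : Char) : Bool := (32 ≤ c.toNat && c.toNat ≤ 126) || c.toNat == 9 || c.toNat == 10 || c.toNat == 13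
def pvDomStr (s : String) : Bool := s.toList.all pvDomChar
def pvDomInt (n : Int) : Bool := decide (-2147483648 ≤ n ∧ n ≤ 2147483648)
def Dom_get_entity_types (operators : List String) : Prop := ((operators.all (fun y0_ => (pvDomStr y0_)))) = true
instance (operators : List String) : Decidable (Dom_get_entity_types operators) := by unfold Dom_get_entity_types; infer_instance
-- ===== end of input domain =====

-- B replaces A's two table-lookup scans with one pass that parses each operator's '@<core>?' shape; objective: alternative (same cost).


-- ===== PORT A =====
def pvOpToType : PySem.Dict String String :=
  PySem.Dict.ofList [("@person?", "person"), ("@company?", "company"), ("@email?", "email"),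
   ("@phone?", "phone"), ("@address?", "address"), ("@username?", "username"),
   ("@p?", "person"), ("@c?", "company"), ("@e?", "email"),
   ("@t?", "phone"), ("@a?", "address"), ("@u?", "username")]

def pvAllOps : PySem.Set String := ["@entity?", "@ent?"]

def pvAllTypes : PySem.Set String :=
  ["person", "company", "email", "phone", "address", "username"]

def get_entity_types (operators : List String) : List String :=
  if operators.any (fun op => PySem.Set.contains pvAllOps op) then
    pvAllTypes
  else
    operators.foldl
      (fun result op =>
        match PySem.Dict.get? pvOpToType op with
        | some t => PySem.Set.add result t
        | none => result)
      PySem.Set.empty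

-- ===== PORT B =====
def pvShortToType : PySem.Dict String String :=
  PySem.Dict.ofList [("p", "person"), ("c", "company"), ("e", "email"),
   ("t", "phone"), ("a", "address"), ("u", "username")]

def pvAllTypesOrdered : List String :=
  ["person", "company", "email", "phone", "address", "username"]

def getEntityTypesParseLoop : List String → PySem.Set String → PySem.Set String
  | [], result => result
  | op :: rest, result =>
    if PySem.Str.startswith op "@" && PySem.Str.endswith op "?" then
      let core := PySem.Str.slice op (some 1) (some (-1))
      if core == "entity" || core == "ent" then
        PySem.Set.ofList pvAllTypesOrdered
      else
        let full := PySem.Dict.getD pvShortToType core core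
        if pvAllTypesOrdered.contains full then
          getEntityTypesParseLoop rest (PySem.Set.add result full)
        else
          getEntityTypesParseLoop rest result
    else
      getEntityTypesParseLoop rest result

def get_entity_types_alt (operators : List String) : List String :=
  getEntityTypesParseLoop operators PySem.Set.empty

-- ===== PRECONDITION & SPEC =====
def Spec_get_entity_types (operators : List String) (out : List String) : Prop := out = get_entity_types_alt operators
instance (operators : List String) (out : List String) : Decidable (Spec_get_entity_types operators out) := by unfold Spec_get_entity_types; infer_instance

-- ===== CLAIM (what is proved, stated in full; the proofs are below) =====
def Claim_equal_get_entity_types : Prop := ∀ (operators : List String), Dom_get_entity_types operators → Spec_get_entity_types operators (get_entity_types operators)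

-- ===== LEMMAS AND PROOFS =====

-- A's per-operator table step (proof-only abbreviation of the fold body in port A).
def aTableStep (result : PySem.Set String) (op : String) : PySem.Set String :=
  match PySem.Dict.get? pvOpToType op with
  | some t => PySem.Set.add result t
  | none => result

-- The 14 cores an operator can have and still matter to either program.
def pvCores : List (List Char) :=
  ["entity".toList, "ent".toList,
   "person".toList, "company".toList, "email".toList, "phone".toList, "address".toList, "username".toList,
   "p".toList, "c".toList, "e".toList, "t".toList, "a".toList, "u".toList]

theorem op_ne_of_mid_ne {op lit : String} {mid k : List Char}
    (hop : op.toList = '@' :: mid ++ ['?'])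
    (hlit : lit.toList = '@' :: k ++ ['?'])
    (h : mid ≠ k) : op ≠ lit := by
  intro e
  apply h
  rw [e, hlit] at hop
  simpa using hop.symm

-- an operator that passes B's shape test has toList '@' :: mid ++ ['?']
theorem shape_of_start_end {op : String}
    (h : (PySem.Str.startswith op "@" && PySem.Str.endswith op "?") = true) :
    ∃ mid : List Char, op.toList = '@' :: mid ++ ['?'] := by
  simp only [Bool.and_eq_true] at h
  obtain ⟨h1, h2⟩ := h
  have hp : "@".toList <+: op.toList := (PySem.Chars.startswith_iff _ _).mp (by simpa using h1)
  have hs : "?".toList <:+ op.toList := (PySem.Chars.endswith_iff _ _).mp (by simpa using h2)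
  obtain ⟨t, ht⟩ := hp
  obtain ⟨s, hst⟩ := hs
  have ht' : op.toList = '@' :: t := by simpa using ht.symm
  have hs' : op.toList = s ++ ['?'] := by simpa using hst.symm
  cases s with
  | nil =>
    exfalso
    have := ht'.symm.trans hs'
    simp at this
  | cons c cs =>
    have hce : '@' :: t = c :: (cs ++ ['?']) := ht'.symm.trans hs'
    simp only [List.cons.injEq] at hce
    exact ⟨cs, by rw [ht', hce.2]; simp⟩

theorem core_toList {op : String} {mid : List Char}
    (hop : op.toList = '@' :: mid ++ ['?']) :
    (PySem.Str.slice op (some 1) (some (-1))).toList = mid := by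
  simp [hop, PySem.List.slice]

-- one step of B's loop equals A's per-operator decision, for EVERY string op
theorem parseLoop_cons (op : String) (rest : List String) (result : PySem.Set String) :
    getEntityTypesParseLoop (op :: rest) result =
      if PySem.Set.contains pvAllOps op then pvAllTypes
      else getEntityTypesParseLoop rest (aTableStep result op) := by
  by_cases hse : (PySem.Str.startswith op "@" && PySem.Str.endswith op "?") = true
  · obtain ⟨mid, hop⟩ := shape_of_start_end hse
    by_cases hmem : mid ∈ pvCores
    · simp only [pvCores, List.mem_cons, List.not_mem_nil, or_false] at hmem
      rcases hmem with h|h|h|h|h|h|h|h|h|h|h|h|h|h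
      · have : op = "@entity?" := String.toList_inj.mp (by rw [hop, h]; decide)
        subst this; rfl
      · have : op = "@ent?" := String.toList_inj.mp (by rw [hop, h]; decide)
        subst this; rfl
      · have : op = "@person?" := String.toList_inj.mp (by rw [hop, h]; decide)
        subst this; rfl
      · have : op = "@company?" := String.toList_inj.mp (by rw [hop, h]; decide)
        subst this; rfl
      · have : op = "@email?" := String.toList_inj.mp (by rw [hop, h]; decide)
        subst this; rfl
      · have : op = "@phone?" := String.toList_inj.mp (by rw [hop, h]; decide)
        subst this; rfl
      · have : op = "@address?" := String.toList_inj.mp (by rw [hop, h]; decide)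
        subst this; rfl
      · have : op = "@username?" := String.toList_inj.mp (by rw [hop, h]; decide)
        subst this; rfl
      · have : op = "@p?" := String.toList_inj.mp (by rw [hop, h]; decide)
        subst this; rfl
      · have : op = "@c?" := String.toList_inj.mp (by rw [hop, h]; decide)
        subst this; rfl
      · have : op = "@e?" := String.toList_inj.mp (by rw [hop, h]; decide)
        subst this; rfl
      · have : op = "@t?" := String.toList_inj.mp (by rw [hop, h]; decide)
        subst this; rfl
      · have : op = "@a?" := String.toList_inj.mp (by rw [hop, h]; decide)
        subst this; rfl
      · have : op = "@u?" := String.toList_inj.mp (by rw [hop, h]; decide)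
        subst this; rfl
    · simp only [pvCores, List.mem_cons, List.not_mem_nil, or_false, not_or] at hmem
      obtain ⟨hEntity, hEnt, hPerson, hCompany, hEmail, hPhone, hAddress, hUsername, hP, hC, hE, hT, hA, hU⟩ := hmem
      have hcore : (PySem.Str.slice op (some 1) (some (-1))).toList = mid := core_toList hop
      have cne : ∀ s : String, mid ≠ s.toList → PySem.Str.slice op (some 1) (some (-1)) ≠ s := by
        intro s hs e
        exact hs (by rw [← hcore, e])
      have c1 := cne "entity" hEntity
      have c2 := cne "ent" hEnt
      have c3 := cne "person" hPerson
      have c4 := cne "company" hCompany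
      have c5 := cne "email" hEmail
      have c6 := cne "phone" hPhone
      have c7 := cne "address" hAddress
      have c8 := cne "username" hUsername
      have c9 := cne "p" hP
      have c10 := cne "c" hC
      have c11 := cne "e" hE
      have c12 := cne "t" hT
      have c13 := cne "a" hA
      have c14 := cne "u" hU
      have o1 : op ≠ "@entity?" := op_ne_of_mid_ne hop (by decide) hEntity
      have o2 : op ≠ "@ent?" := op_ne_of_mid_ne hop (by decide) hEnt
      have o3 : op ≠ "@person?" := op_ne_of_mid_ne hop (by decide) hPerson
      have o4 : op ≠ "@company?" := op_ne_of_mid_ne hop (by decide) hCompany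
      have o5 : op ≠ "@email?" := op_ne_of_mid_ne hop (by decide) hEmail
      have o6 : op ≠ "@phone?" := op_ne_of_mid_ne hop (by decide) hPhone
      have o7 : op ≠ "@address?" := op_ne_of_mid_ne hop (by decide) hAddress
      have o8 : op ≠ "@username?" := op_ne_of_mid_ne hop (by decide) hUsername
      have o9 : op ≠ "@p?" := op_ne_of_mid_ne hop (by decide) hP
      have o10 : op ≠ "@c?" := op_ne_of_mid_ne hop (by decide) hC
      have o11 : op ≠ "@e?" := op_ne_of_mid_ne hop (by decide) hE
      have o12 : op ≠ "@t?" := op_ne_of_mid_ne hop (by decide) hT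
      have o13 : op ≠ "@a?" := op_ne_of_mid_ne hop (by decide) hA
      have o14 : op ≠ "@u?" := op_ne_of_mid_ne hop (by decide) hU
      have hd : pvShortToType = PySem.Dict.mk
          [("p", "person"), ("c", "company"), ("e", "email"),
           ("t", "phone"), ("a", "address"), ("u", "username")] := rfl
      have hd2 : pvOpToType = PySem.Dict.mk
          [("@person?", "person"), ("@company?", "company"), ("@email?", "email"),
           ("@phone?", "phone"), ("@address?", "address"), ("@username?", "username"),
           ("@p?", "person"), ("@c?", "company"), ("@e?", "email"),
           ("@t?", "phone"), ("@a?", "address"), ("@u?", "username")] := rfl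
      have hnone : PySem.Dict.get? pvOpToType op = none := by
        simp [hd2, PySem.Dict.get?, Ne.symm o3, Ne.symm o4, Ne.symm o5, Ne.symm o6,
          Ne.symm o7, Ne.symm o8, Ne.symm o9, Ne.symm o10, Ne.symm o11, Ne.symm o12,
          Ne.symm o13, Ne.symm o14]
      have hgetD : PySem.Dict.getD pvShortToType (PySem.Str.slice op (some 1) (some (-1)))
          (PySem.Str.slice op (some 1) (some (-1))) = PySem.Str.slice op (some 1) (some (-1)) := by
        simp [PySem.Dict.getD, hd, PySem.Dict.get?, Ne.symm c9, Ne.symm c10, Ne.symm c11,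
          Ne.symm c12, Ne.symm c13, Ne.symm c14]
      simp only [getEntityTypesParseLoop, hse, if_true]
      simp [aTableStep, hnone, PySem.Set.contains, pvAllOps, o1, o2, c1, c2, hgetD,
        pvAllTypesOrdered, c3, c4, c5, c6, c7, c8]
  · have hse' : (PySem.Str.startswith op "@" && PySem.Str.endswith op "?") = false := by
      simpa using hse
    have pvKey : ∀ lit : String,
        (PySem.Str.startswith lit "@" && PySem.Str.endswith lit "?") = true → op ≠ lit := by
      intro l hl e
      rw [e] at hse
      exact hse hl
    have o1 : op ≠ "@entity?" := pvKey "@entity?" (by decide)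
    have o2 : op ≠ "@ent?" := pvKey "@ent?" (by decide)
    have o3 : op ≠ "@person?" := pvKey "@person?" (by decide)
    have o4 : op ≠ "@company?" := pvKey "@company?" (by decide)
    have o5 : op ≠ "@email?" := pvKey "@email?" (by decide)
    have o6 : op ≠ "@phone?" := pvKey "@phone?" (by decide)
    have o7 : op ≠ "@address?" := pvKey "@address?" (by decide)
    have o8 : op ≠ "@username?" := pvKey "@username?" (by decide)
    have o9 : op ≠ "@p?" := pvKey "@p?" (by decide)
    have o10 : op ≠ "@c?" := pvKey "@c?" (by decide)
    have o11 : op ≠ "@e?" := pvKey "@e?" (by decide)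
    have o12 : op ≠ "@t?" := pvKey "@t?" (by decide)
    have o13 : op ≠ "@a?" := pvKey "@a?" (by decide)
    have o14 : op ≠ "@u?" := pvKey "@u?" (by decide)
    have hd2 : pvOpToType = PySem.Dict.mk
        [("@person?", "person"), ("@company?", "company"), ("@email?", "email"),
         ("@phone?", "phone"), ("@address?", "address"), ("@username?", "username"),
         ("@p?", "person"), ("@c?", "company"), ("@e?", "email"),
         ("@t?", "phone"), ("@a?", "address"), ("@u?", "username")] := rfl
    have hnone : PySem.Dict.get? pvOpToType op = none := by
      simp [hd2, PySem.Dict.get?, Ne.symm o3, Ne.symm o4, Ne.symm o5, Ne.symm o6,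
        Ne.symm o7, Ne.symm o8, Ne.symm o9, Ne.symm o10, Ne.symm o11, Ne.symm o12,
        Ne.symm o13, Ne.symm o14]
    simp only [getEntityTypesParseLoop, hse', Bool.false_eq_true, if_false]
    simp [aTableStep, hnone, PySem.Set.contains, pvAllOps, o1, o2]

theorem parseLoop_eq (operators : List String) :
    ∀ result : PySem.Set String,
      getEntityTypesParseLoop operators result =
        if operators.any (fun op => PySem.Set.contains pvAllOps op) then pvAllTypes
        else operators.foldl aTableStep result := by
  induction operators with
  | nil => intro result; simp [getEntityTypesParseLoop]
  | cons op rest ih =>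
    intro result
    rw [parseLoop_cons]
    by_cases h : op ∈ pvAllOps
    · simp [h]
    · simp [h, ih]

-- ===== VERDICT (by name: the statement is the Claim_ definition above) =====
theorem get_entity_types_spec : Claim_equal_get_entity_types := by
  intro operators _
  unfold Spec_get_entity_types get_entity_types get_entity_types_alt
  rw [parseLoop_eq]
  rfl
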